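-- pv_equiv track=rewrite | github.com/jbarry1990/AdventOfCode | Day 16/Puzzle16b.py | GroupInCorrespondingFields
-- ===== SOURCE A (Python) =====
-- def GroupInCorrespondingFields(ValidTickets):
--     CorrespondingFields = []
--     NumberOfFields = len(ValidTickets[0])
--
--     for Length in range(NumberOfFields):
--         FieldPosition = []
--         for Ticket in ValidTickets:
--             for Position, Field in enumerate(Ticket):
--                 if Position == Length:
--                     FieldPosition.append(int(Field))
--         CorrespondingFields.append(FieldPosition)
--
--     return CorrespondingFields
-- ===== SOURCE B (Python) =====
-- def GroupInCorrespondingFields(ValidTickets):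
--     NumberOfFields = len(ValidTickets[0])
--     CorrespondingFields = [[] for _ in range(NumberOfFields)]
--     for Ticket in ValidTickets:
--         for Position, Field in enumerate(Ticket[:NumberOfFields]):
--             CorrespondingFields[Position].append(int(Field))
--     return CorrespondingFields
-- ===== Notes on version B (the rewrite author's own statement) =====
-- stated objective: faster
-- what changed: Replaces A's column-outer loop, which rescans every position of every ticket once per column, by a single row-major pass that appends each field into its pre-allocated per-column list.
import Mathlib
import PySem

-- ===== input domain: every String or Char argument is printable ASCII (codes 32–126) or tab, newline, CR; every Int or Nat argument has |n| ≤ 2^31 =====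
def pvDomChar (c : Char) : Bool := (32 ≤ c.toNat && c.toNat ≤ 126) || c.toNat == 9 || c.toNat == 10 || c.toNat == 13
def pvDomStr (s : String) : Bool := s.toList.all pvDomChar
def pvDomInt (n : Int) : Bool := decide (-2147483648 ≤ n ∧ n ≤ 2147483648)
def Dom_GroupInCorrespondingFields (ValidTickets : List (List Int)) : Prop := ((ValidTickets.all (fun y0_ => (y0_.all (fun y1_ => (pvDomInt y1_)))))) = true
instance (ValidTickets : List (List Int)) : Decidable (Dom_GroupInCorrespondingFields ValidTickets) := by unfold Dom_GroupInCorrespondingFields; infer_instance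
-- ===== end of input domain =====

-- B replaces A's column-outer loop (which rescans every ticket once per column) by a single
-- row-major pass that appends each field into its pre-allocated column list: O(rows·cols)
-- instead of O(rows·cols²); equivalence of the RETURN values is proved below.

-- ===== PORT A =====
-- Literal port of A: for Length in range(len(ValidTickets[0])), rescan all tickets,
-- appending Field whenever Position == Length.  int(Field) on an int is the identity.
def GroupInCorrespondingFields (ValidTickets : List (List Int)) : List (List Int) :=
  let NumberOfFields : Int := ((ValidTickets.headD []).length : Int)
  (PySem.List.pyRange 0 NumberOfFields 1).foldl
    (fun CorrespondingFields Length =>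
      CorrespondingFields ++
        [ValidTickets.foldl
          (fun FieldPosition Ticket =>
            (PySem.List.enumerate Ticket 0).foldl
              (fun FieldPosition p =>
                if p.1 = Length then FieldPosition ++ [p.2] else FieldPosition)
              FieldPosition)
          []])
    []

-- ===== PORT B =====
-- Literal port of B: pre-allocate one empty list per column, then one row-major pass.
-- Ticket[:NumberOfFields] is List.take (slice with nonnegative Nat bound ⇒ exact);
-- enumerate of the truncated ticket is List.zipIdx (indices 0..len-1, always in range,
-- so .append at that index is List.modify there).
def GroupInCorrespondingFields_alt (ValidTickets : List (List Int)) : List (List Int) :=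
  let NumberOfFields : Nat := (ValidTickets.headD []).length
  ValidTickets.foldl
    (fun CorrespondingFields Ticket =>
      ((Ticket.take NumberOfFields).zipIdx).foldl
        (fun CorrespondingFields p =>
          CorrespondingFields.modify p.2 (fun c => c ++ [p.1]))
        CorrespondingFields)
    (List.replicate NumberOfFields [])

-- ===== PRECONDITION & SPEC =====
-- Pre_ excludes only the empty ticket list, on which the Python A (and B) raises IndexError
-- at ValidTickets[0].
def Pre_GroupInCorrespondingFields (ValidTickets : List (List Int)) : Prop :=
  ValidTickets ≠ []
instance (ValidTickets : List (List Int)) : Decidable (Pre_GroupInCorrespondingFields ValidTickets) := by unfold Pre_GroupInCorrespondingFields; infer_instance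

def pvWitness_GroupInCorrespondingFields : List (List Int) := [[1, 2], [3, 4], [5, 6]]

def Spec_GroupInCorrespondingFields (ValidTickets : List (List Int)) (out : List (List Int)) : Prop := out = GroupInCorrespondingFields_alt ValidTickets
instance (ValidTickets : List (List Int)) (out : List (List Int)) : Decidable (Spec_GroupInCorrespondingFields ValidTickets out) := by unfold Spec_GroupInCorrespondingFields; infer_instance

-- ===== CLAIM (what is proved, stated in full; the proofs are below) =====
def Claim_equal_GroupInCorrespondingFields : Prop := ∀ (ValidTickets : List (List Int)), Dom_GroupInCorrespondingFields ValidTickets → Pre_GroupInCorrespondingFields ValidTickets → Spec_GroupInCorrespondingFields ValidTickets (GroupInCorrespondingFields ValidTickets)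

-- ===== LEMMAS AND PROOFS =====

-- Both sides are shown equal to this common transpose description.
def pvTranspose (n : Nat) (ts : List (List Int)) : List (List Int) :=
  (List.range n).map (fun j => ts.filterMap (fun t => t[j]?))

-- A's innermost loop over enumerate picks out the single field at index L (if any).
theorem pvA_inner (t : List Int) : ∀ (s L : Int) (fp : List Int),
    (PySem.List.enumerate t s).foldl
      (fun FP p => if p.1 = L then FP ++ [p.2] else FP) fp
    = fp ++ (if s ≤ L then (t[(L - s).toNat]?).toList else []) := by
  induction t with
  | nil => intro s L fp; simp [PySem.List.enumerate_nil]
  | cons x t ih =>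
    intro s L fp
    rw [PySem.List.enumerate_cons]
    simp only [List.foldl_cons]
    by_cases h : s = L
    · subst h
      rw [if_pos rfl, ih]
      have h1 : ¬ (s + 1 ≤ s) := by omega
      simp [h1]
    · simp only [if_neg h]
      rw [ih]
      by_cases h2 : s ≤ L
      · have h3 : s + 1 ≤ L := by omega
        have h4 : (L - s).toNat = (L - (s + 1)).toNat + 1 := by omega
        simp [h2, h3, h4]
      · have h3 : ¬ (s + 1 ≤ L) := by omega
        simp [h2, h3]

-- A's middle loop over the tickets builds the column at nonnegative index L.
theorem pvA_tickets (ts : List (List Int)) (L : Int) (hL : 0 ≤ L) : ∀ (acc : List Int),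
    ts.foldl
      (fun FP t =>
        (PySem.List.enumerate t 0).foldl
          (fun FP p => if p.1 = L then FP ++ [p.2] else FP) FP)
      acc
    = acc ++ ts.filterMap (fun t => t[L.toNat]?) := by
  induction ts with
  | nil => intro acc; simp
  | cons t ts ih =>
    intro acc
    simp only [List.foldl_cons]
    rw [pvA_inner, ih]
    have : (L - 0).toNat = L.toNat := by omega
    rw [if_pos hL, this, List.filterMap_cons]
    cases t[L.toNat]? <;> simp

-- Appending singletons in a foldl is a map.
theorem pvFoldl_append_singleton {α β : Type} (l : List α) (f : α → β) : ∀ (acc : List β),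
    l.foldl (fun a x => a ++ [f x]) acc = acc ++ l.map f := by
  induction l with
  | nil => intro acc; simp
  | cons x l ih => intro acc; simp [ih]

theorem pvA_eq (VT : List (List Int)) :
    GroupInCorrespondingFields VT = pvTranspose (VT.headD []).length VT := by
  unfold GroupInCorrespondingFields pvTranspose
  rw [pvFoldl_append_singleton, List.nil_append, PySem.List.pyRange_one]
  have : ((((VT.headD []).length : Int)) - 0).toNat = (VT.headD []).length := by omega
  rw [this, List.map_map]
  apply List.map_congr_left
  intro j _
  simp only [Function.comp]
  rw [pvA_tickets _ _ (by positivity)]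
  simp

-- B's inner loop over one (truncated) ticket, described pointwise.
theorem pvB_step (l : List Int) : ∀ (k : Nat) (cols : List (List Int)) (j : Nat),
    ((l.zipIdx k).foldl (fun c p => c.modify p.2 (fun x => x ++ [p.1])) cols)[j]?
    = cols[j]?.map (fun c => c ++ (if k ≤ j then (l[j - k]?).toList else [])) := by
  induction l with
  | nil =>
    intro k cols j
    cases h : cols[j]? <;> simp [List.zipIdx, h]
  | cons x l ih =>
    intro k cols j
    rw [List.zipIdx_cons]
    simp only [List.foldl_cons]
    rw [ih]
    rw [List.getElem?_modify]
    by_cases h : j = k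
    · subst h
      have h1 : ¬ (j + 1 ≤ j) := by omega
      cases hc : cols[j]? <;> simp [h1]
    · by_cases h2 : k ≤ j
      · have h3 : k + 1 ≤ j := by omega
        have h4 : j - k = (j - (k + 1)) + 1 := by omega
        cases hc : cols[j]? <;> simp [Ne.symm h, h2, h3, h4]
      · have h3 : ¬ (k + 1 ≤ j) := by omega
        cases hc : cols[j]? <;> simp [Ne.symm h, h2, h3]

-- B's outer loop over the tickets, described pointwise.
theorem pvB_tickets (n : Nat) (ts : List (List Int)) : ∀ (cols : List (List Int)) (j : Nat),
    (ts.foldl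
      (fun cols t =>
        ((t.take n).zipIdx).foldl (fun c p => c.modify p.2 (fun x => x ++ [p.1])) cols)
      cols)[j]?
    = cols[j]?.map (fun c => c ++ ts.filterMap (fun t => (t.take n)[j]?)) := by
  induction ts with
  | nil => intro cols j; cases h : cols[j]? <;> simp [h]
  | cons t ts ih =>
    intro cols j
    simp only [List.foldl_cons]
    rw [ih, pvB_step]
    simp only [Nat.zero_le, if_pos, Nat.sub_zero]
    rw [List.filterMap_cons]
    cases hc : cols[j]? <;> cases ht : (t.take n)[j]? <;> simp

theorem pvB_eq (VT : List (List Int)) :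
    GroupInCorrespondingFields_alt VT = pvTranspose (VT.headD []).length VT := by
  unfold GroupInCorrespondingFields_alt pvTranspose
  apply List.ext_getElem?
  intro j
  rw [pvB_tickets]
  rw [List.getElem?_replicate]
  by_cases hj : j < (VT.headD []).length
  · rw [if_pos hj]
    rw [List.getElem?_map, List.getElem?_range hj]
    simp only [Option.map_some, Option.map_some, List.nil_append]
    congr 1
    apply List.filterMap_congr
    intro t _
    rw [List.getElem?_take, if_pos hj]
  · rw [if_neg hj]
    rw [List.getElem?_map]
    rw [List.getElem?_eq_none (by simpa using Nat.le_of_not_lt hj)]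
    simp

-- ===== VERDICT (by name: the statement is the Claim_ definition above) =====
theorem GroupInCorrespondingFields_spec : Claim_equal_GroupInCorrespondingFields := by
  intro VT _ _
  unfold Spec_GroupInCorrespondingFields
  rw [pvA_eq, pvB_eq]
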